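-- pv_equiv track=rewrite | github.com/aaronspindler/aaronspindler.com | pages/management/commands/build_css.py | _consolidate_shorthand
-- ===== SOURCE A (Python) =====
-- def _consolidate_shorthand(props, prefix):
--     """
--     Consolidate individual properties into shorthand notation.
--
--     Converts margin-top, margin-right, margin-bottom, margin-left
--     into a single margin property (same for padding, border).
--
--     Optimizes based on value patterns:
--     - All same: "10px"
--     - Vertical/horizontal same: "10px 20px"
--     - Bottom different: "10px 20px 30px"
--     - All different: "10px 20px 30px 40px"
--     """
--     sides = ['top', 'right', 'bottom', 'left']
--     individual_props = [f'{prefix}-{side}' for side in sides]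
--
--     values = []
--     for prop in individual_props:
--         if prop in props:
--             values.append(props[prop])
--         else:
--             return props
--
--     for prop in individual_props:
--         del props[prop]
--
--     if len(set(values)) == 1:
--         props[prefix] = values[0]
--     elif values[0] == values[2] and values[1] == values[3]:
--         props[prefix] = f'{values[0]} {values[1]}'
--     elif values[1] == values[3]:
--         props[prefix] = f'{values[0]} {values[1]} {values[2]}'
--     else:
--         props[prefix] = ' '.join(values)
--
--     return props
-- ===== SOURCE B (Python) =====
-- def _expand(vals):
--     """Expand a 1-to-4-value CSS shorthand tuple to the full (top, right, bottom, left)."""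
--     t = vals[0]
--     r = vals[1] if len(vals) > 1 else t
--     b = vals[2] if len(vals) > 2 else t
--     l = vals[3] if len(vals) > 3 else r
--     return (t, r, b, l)
--
--
-- def _consolidate_shorthand(props, prefix):
--     """Consolidate prefix-top/right/bottom/left into the shortest shorthand by
--     generate-and-verify: pick the shortest prefix of the four values whose CSS
--     expansion reproduces them, instead of an explicit pattern cascade."""
--     keys = [f'{prefix}-{side}' for side in ('top', 'right', 'bottom', 'left')]
--     try:
--         quad = tuple(props[k] for k in keys)
--     except KeyError:
--         return props
--     cand = quad
--     for n in range(1, 5):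
--         if _expand(quad[:n]) == quad:
--             cand = quad[:n]
--             break
--     for k in keys:
--         del props[k]
--     props[prefix] = ' '.join(cand)
--     return props
-- ===== Notes on version B (the rewrite author's own statement) =====
-- stated objective: alternative
-- what changed: Replaces A's explicit four-way if/elif value-pattern cascade (with a set-cardinality test) by a generate-and-verify search: B tries the prefixes quad[:1..4] of the four gathered values and keeps the shortest one whose CSS expansion (via an _expand helper implementing the 1/2/3/4-value expansion rule) reproduces the original quadruple; gathering uses a try/except comprehension instead of A's loop with early return.
import Mathlib
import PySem

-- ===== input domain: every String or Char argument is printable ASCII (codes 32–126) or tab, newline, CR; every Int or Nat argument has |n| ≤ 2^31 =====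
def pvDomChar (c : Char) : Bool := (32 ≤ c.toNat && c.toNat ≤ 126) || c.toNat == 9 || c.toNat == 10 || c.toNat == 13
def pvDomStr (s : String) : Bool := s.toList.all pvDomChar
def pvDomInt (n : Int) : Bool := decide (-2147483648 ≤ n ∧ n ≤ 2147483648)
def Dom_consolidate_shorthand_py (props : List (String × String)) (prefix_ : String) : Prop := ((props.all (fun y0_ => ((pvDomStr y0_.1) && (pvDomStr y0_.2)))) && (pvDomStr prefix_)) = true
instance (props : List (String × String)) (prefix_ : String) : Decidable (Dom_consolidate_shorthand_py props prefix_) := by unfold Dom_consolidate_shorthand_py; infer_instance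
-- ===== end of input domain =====

-- B replaces A's explicit value-pattern cascade by a generate-and-verify search for the
-- shortest prefix of the four values whose CSS expansion reproduces them (alternative
-- decomposition, same cost); equivalence of the RETURN value is proved (both Pythons
-- mutate `props` identically in place).

-- ===== PORT A =====
-- gather loop of A: append props[prop] for each key, early-return (none) on a missing key
def pvGatherA (d : PySem.Dict String String) : List String → Option (List String)
  | [] => some []
  | p :: rest =>
      if d.contains p then
        match pvGatherA d rest with
        | some vs => some (d.getD p "" :: vs)   -- props[prop]: exact, guarded by `contains`
        | none => none
      else none

def consolidate_shorthand_py (props : List (String × String)) (prefix_ : String) : List (String × String) :=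
  let d := PySem.Dict.ofList props
  let individual_props := (["top", "right", "bottom", "left"].map (fun side => prefix_ ++ "-" ++ side))
  match pvGatherA d individual_props with
  | none => d.items
  | some values =>
    let d := individual_props.foldl (fun d p => d.erase p) d
    let v0 := PySem.List.pyGetD values 0 ""
    let v1 := PySem.List.pyGetD values 1 ""
    let v2 := PySem.List.pyGetD values 2 ""
    let v3 := PySem.List.pyGetD values 3 ""
    let d :=
      if PySem.Set.len (PySem.Set.ofList values) = 1 then d.insert prefix_ v0
      else if v0 = v2 ∧ v1 = v3 then d.insert prefix_ (v0 ++ " " ++ v1)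
      else if v1 = v3 then d.insert prefix_ (v0 ++ " " ++ v1 ++ " " ++ v2)
      else d.insert prefix_ (PySem.Str.join " " values)
    d.items

-- ===== PORT B =====
-- _expand(vals): the 1-to-4-value CSS expansion rule (vals is always nonempty at the
-- call site, so vals[0] is ported as pyGetD with an unused default)
def pvExpand (vals : List String) : List String :=
  let t := PySem.List.pyGetD vals 0 ""
  let r := if 1 < vals.length then PySem.List.pyGetD vals 1 "" else t
  let b := if 2 < vals.length then PySem.List.pyGetD vals 2 "" else t
  let l := if 3 < vals.length then PySem.List.pyGetD vals 3 "" else r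
  [t, r, b, l]

-- 'for n in range(1, 5): if _expand(quad[:n]) == quad: cand = quad[:n]; break'
-- (cand starts as quad and is quad when the loop falls through)
def pvFindCand (quad : List String) : List Int → List String
  | [] => quad
  | n :: rest =>
      if pvExpand (PySem.List.slice quad none (some n)) = quad
      then PySem.List.slice quad none (some n)
      else pvFindCand quad rest

-- 'quad = tuple(props[k] for k in keys)' with KeyError caught: none on the first missing key
def pvGatherB (d : PySem.Dict String String) : List String → Option (List String)
  | [] => some []
  | k :: rest =>
      match d.get? k with
      | none => none
      | some v =>
          match pvGatherB d rest with
          | some vs => some (v :: vs)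
          | none => none

def consolidate_shorthand_py_alt (props : List (String × String)) (prefix_ : String) : List (String × String) :=
  let d := PySem.Dict.ofList props
  let keys := (["top", "right", "bottom", "left"].map (fun side => prefix_ ++ "-" ++ side))
  match pvGatherB d keys with
  | none => d.items
  | some quad =>
    let cand := pvFindCand quad (PySem.List.pyRange 1 5 1)
    let d := keys.foldl (fun d k => d.erase k) d
    (d.insert prefix_ (PySem.Str.join " " cand)).items

-- ===== PRECONDITION & SPEC =====
def Spec_consolidate_shorthand_py (props : List (String × String)) (prefix_ : String) (out : List (String × String)) : Prop := out = consolidate_shorthand_py_alt props prefix_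
instance (props : List (String × String)) (prefix_ : String) (out : List (String × String)) : Decidable (Spec_consolidate_shorthand_py props prefix_ out) := by unfold Spec_consolidate_shorthand_py; infer_instance

-- ===== CLAIM (what is proved, stated in full; the proofs are below) =====
def Claim_equal_consolidate_shorthand_py : Prop := ∀ (props : List (String × String)) (prefix_ : String), Dom_consolidate_shorthand_py props prefix_ → Spec_consolidate_shorthand_py props prefix_ (consolidate_shorthand_py props prefix_)

-- ===== LEMMAS AND PROOFS =====

theorem gather_eq (d : PySem.Dict String String) (ks : List String) :
    pvGatherA d ks = pvGatherB d ks := by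
  induction ks with
  | nil => rfl
  | cons k rest ih =>
    unfold pvGatherA pvGatherB
    rw [PySem.Dict.contains_eq_isSome_get?]
    cases h : d.get? k with
    | none => simp
    | some v => simp [ih, PySem.Dict.getD_eq_get?_getD, h]

theorem join_one (a : String) : PySem.Str.join " " [a] = a := by
  simp [PySem.Str.join]

theorem space_cons (l : List Char) : String.ofList (' ' :: l) = " " ++ String.ofList l := by
  rw [show (' ' :: l) = [' '] ++ l from rfl, String.ofList_append]

theorem join_two (a b : String) : PySem.Str.join " " [a, b] = a ++ " " ++ b := by
  simp [PySem.Str.join, PySem.Chars.join_cons_cons, PySem.Chars.join_singleton,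
    String.ofList_append, space_cons, String.append_assoc]

theorem join_three (a b c : String) : PySem.Str.join " " [a, b, c] = a ++ " " ++ b ++ " " ++ c := by
  simp [PySem.Str.join, PySem.Chars.join_cons_cons, PySem.Chars.join_singleton,
    String.ofList_append, space_cons, String.append_assoc]

theorem set_len_one_iff (t r b l : String) :
    PySem.Set.len (PySem.Set.ofList [t, r, b, l]) = 1 ↔ r = t ∧ b = t ∧ l = t := by
  by_cases hr : r = t <;> by_cases hb : b = t <;> by_cases hl : l = t <;>
    simp [PySem.Set.ofList, PySem.Set.add, PySem.Set.len, PySem.Set.contains, hr, hb, hl] <;>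
    split_ifs <;> simp_all

theorem expand_one (t : String) : pvExpand [t] = [t, t, t, t] := by
  simp [pvExpand, PySem.List.pyGetD_ofNat']

theorem expand_two (t r : String) : pvExpand [t, r] = [t, r, t, r] := by
  simp [pvExpand, PySem.List.pyGetD_ofNat']

theorem expand_three (t r b : String) : pvExpand [t, r, b] = [t, r, b, r] := by
  simp [pvExpand, PySem.List.pyGetD_ofNat']

theorem expand_four (t r b l : String) : pvExpand [t, r, b, l] = [t, r, b, l] := by
  simp [pvExpand, PySem.List.pyGetD_ofNat']

theorem slice1 (t r b l : String) : PySem.List.slice [t, r, b, l] none (some 1) = [t] := by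
  simp [PySem.List.slice_to]

theorem slice2 (t r b l : String) : PySem.List.slice [t, r, b, l] none (some 2) = [t, r] := by
  simp [PySem.List.slice_to]

theorem slice3 (t r b l : String) : PySem.List.slice [t, r, b, l] none (some 3) = [t, r, b] := by
  simp [PySem.List.slice_to]

theorem slice4 (t r b l : String) : PySem.List.slice [t, r, b, l] none (some 4) = [t, r, b, l] := by
  simp [PySem.List.slice_to]

theorem findCand_quad (t r b l : String) :
    pvFindCand [t, r, b, l] (PySem.List.pyRange 1 5 1) =
      if r = t ∧ b = t ∧ l = t then [t]
      else if b = t ∧ l = r then [t, r]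
      else if l = r then [t, r, b]
      else [t, r, b, l] := by
  rw [show PySem.List.pyRange 1 5 1 = [1, 2, 3, 4] from by decide]
  simp only [pvFindCand, slice1, slice2, slice3, slice4, expand_one, expand_two, expand_three,
    expand_four, List.cons.injEq, true_and, and_true]
  by_cases h1 : r = t <;> by_cases h2 : b = t <;> by_cases h3 : l = r <;>
    by_cases h4 : l = t <;> simp_all <;> simp_all [ne_comm]

theorem branch_eq (d : PySem.Dict String String) (p t r b l : String) :
    (if PySem.Set.len (PySem.Set.ofList [t, r, b, l]) = 1 then d.insert p t
     else if t = b ∧ r = l then d.insert p (t ++ " " ++ r)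
     else if r = l then d.insert p (t ++ " " ++ r ++ " " ++ b)
     else d.insert p (PySem.Str.join " " [t, r, b, l]))
    = d.insert p (PySem.Str.join " " (pvFindCand [t, r, b, l] (PySem.List.pyRange 1 5 1))) := by
  rw [findCand_quad]
  simp only [set_len_one_iff]
  by_cases c1 : r = t ∧ b = t ∧ l = t
  · rw [if_pos c1, if_pos c1, join_one]
  · rw [if_neg c1]
    by_cases c2 : b = t ∧ l = r
    · rw [if_pos ⟨c2.1.symm, c2.2.symm⟩, if_neg c1, if_pos c2, join_two]
    · have c2' : ¬(t = b ∧ r = l) := fun h => c2 ⟨h.1.symm, h.2.symm⟩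
      rw [if_neg c2', if_neg c1, if_neg c2]
      by_cases c3 : l = r
      · rw [if_pos c3.symm, if_pos c3, join_three]
      · rw [if_neg (fun h => c3 h.symm), if_neg c3]

-- ===== VERDICT (by name: the statement is the Claim_ definition above) =====
theorem consolidate_shorthand_py_spec : Claim_equal_consolidate_shorthand_py := by
  intro props prefix_ _
  unfold Spec_consolidate_shorthand_py consolidate_shorthand_py consolidate_shorthand_py_alt
  simp only [List.map, gather_eq]
  set d := PySem.Dict.ofList props with hd
  cases h : pvGatherB d [prefix_ ++ "-" ++ "top", prefix_ ++ "-" ++ "right",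
      prefix_ ++ "-" ++ "bottom", prefix_ ++ "-" ++ "left"] with
  | none => rfl
  | some values =>
    obtain ⟨v0, v1, v2, v3, rfl⟩ : ∃ a b c e, values = [a, b, c, e] := by
      revert h
      simp only [pvGatherB]
      cases d.get? (prefix_ ++ "-" ++ "top") <;>
      cases d.get? (prefix_ ++ "-" ++ "right") <;>
      cases d.get? (prefix_ ++ "-" ++ "bottom") <;>
      cases d.get? (prefix_ ++ "-" ++ "left") <;>
        simp <;>
        (intro h; first
          | exact ⟨_, _, _, _, h⟩
          | exact ⟨_, _, _, _, h.symm⟩)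
    dsimp only
    simp only [PySem.List.pyGetD_ofNat', List.getD_cons_zero, List.getD_cons_succ, List.foldl]
    rw [branch_eq]
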